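-- pv_equiv track=rewrite | github.com/7i6ht/math2visual | backend/app/services/visual_generation/container_type_utils.py | update_container_types_optimized
-- ===== SOURCE A (Python) =====
-- from collections import defaultdict
--
-- def update_container_types_optimized(entities, result_entities):
--     """
--     Update the container_type for entities in the same group (by container_type)
--     when there is more than one unique container_name. In addition, treat the last
--     item of result_entities as one of the entities (by reference) so that its
--     container_type is updated if necessary.
--
--     If there is only one unique container_name for a given container_type,
--     leave it unchanged. Otherwise, assign a unique container_type value for each
--     container_name within that group.
--
--     This function is used by both formal and intuitive visual generators to ensure
--     consistent icon selection when multiple containers share the same type but have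
--     different names.
--
--     Parameters:
--     entities (list): List of entity dictionaries.
--     result_entities (list): List of result entity dictionaries.
--         If non-empty, the last item will be processed along with entities.
--
--     Returns:
--     A tuple (entities, result_entities) where:
--         - entities: the original list (with updated container_type values)
--         - result_entities: the modified list (the last item updated as needed)
--     """
--     # Create a temporary combined list from entities.
--     combined = entities[:]  # shallow copy; dictionary objects remain the same
--     if result_entities:
--         # Append the last result entity (by reference) to combined.
--         combined.append(result_entities[-1])
--
--     # Group combined items by the original container_type.
--     entity_type_to_entities = defaultdict(list)
--     for entity in combined:
--         entity_type_to_entities[entity['container_type']].append(entity)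
--
--     # Iterate through each container_type group.
--     for container_type, group in entity_type_to_entities.items():
--         # Group further by container_name.
--         name_to_entities = defaultdict(list)
--         for entity in group:
--             name_to_entities[entity['container_name']].append(entity)
--
--         # If there is only one unique container_name in this group, nothing to change.
--         if len(name_to_entities) <= 1:
--             continue
--
--         # Initialize modification index.
--         modification_index = 1  # for the first unique container_name, leave container_type unchanged.
--
--         # Iterate through unique container_name groups in insertion order.
--         for name, ent_group in name_to_entities.items():
--             if modification_index == 1:
--                 # Use the original container_type for the first group.
--                 new_entity_type = container_type
--             else:
--                 new_entity_type = container_type + "-" + str(modification_index)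
--             # Set the container_type for all entities in this group.
--             for entity in ent_group:
--                 entity['container_type'] = new_entity_type
--             modification_index += 1
--
--     return entities, result_entities
-- ===== SOURCE B (Python) =====
-- def update_container_types_optimized(entities, result_entities):
--     """One streaming pass: per original container_type keep a dict
--     container_name -> assigned type; assign inline while walking combined.
--     Mutates the entity dicts in place, like the original."""
--     combined = entities[:]
--     if result_entities:
--         combined.append(result_entities[-1])
--     assigned_by_type = {}
--     for entity in combined:
--         t = entity['container_type']
--         n = entity['container_name']
--         names = assigned_by_type.setdefault(t, {})
--         if n not in names:
--             names[n] = t if not names else t + "-" + str(len(names) + 1)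
--         entity['container_type'] = names[n]
--     return entities, result_entities
-- ===== Notes on version B (the rewrite author's own statement) =====
-- stated objective: simpler
-- what changed: A groups entities into per-type lists, regroups each into per-name lists and re-iterates the nested groups to write suffixed types; B makes one streaming pass over the combined list, keeping a per-type dict container_name -> assigned type and assigning inline.
import Mathlib
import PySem

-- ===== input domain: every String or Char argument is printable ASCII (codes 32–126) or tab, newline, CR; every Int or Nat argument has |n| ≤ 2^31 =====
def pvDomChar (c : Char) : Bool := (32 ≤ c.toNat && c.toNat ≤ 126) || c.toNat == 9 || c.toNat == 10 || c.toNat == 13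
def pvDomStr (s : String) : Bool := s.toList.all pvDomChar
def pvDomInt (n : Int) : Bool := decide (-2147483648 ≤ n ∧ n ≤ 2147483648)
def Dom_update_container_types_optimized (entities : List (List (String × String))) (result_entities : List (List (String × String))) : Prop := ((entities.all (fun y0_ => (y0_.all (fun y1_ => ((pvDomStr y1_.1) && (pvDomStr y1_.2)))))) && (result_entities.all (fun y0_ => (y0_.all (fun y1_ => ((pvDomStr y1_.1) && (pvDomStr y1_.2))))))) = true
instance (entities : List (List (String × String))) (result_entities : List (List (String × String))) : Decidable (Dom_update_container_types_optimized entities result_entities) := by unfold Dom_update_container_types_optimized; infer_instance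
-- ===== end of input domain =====

-- B replaces A's group-by-type / group-by-name / re-iterate-and-write passes by one streaming
-- pass with a per-type name→assigned-type table (objective: simpler).  Both A and B mutate the
-- entity dicts in place in Python; the equivalence proved here is about the return value.

-- ===== PORT A =====
-- Python dict[str,str] values arrive as assoc lists; PySem.Dict.ofList is Python's dict
-- construction and Dict.items its serialization.  Python mutates shared dict objects through
-- the references collected in the groups; this is modeled by collecting list POSITIONS of the
-- combined list (entities ++ [last result entity]) and updating the list at those positions.
def pvTy (e : PySem.Dict String String) : String := (e.get? "container_type").getD ""
def pvNm (e : PySem.Dict String String) : String := (e.get? "container_name").getD ""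

-- the middle section of A: group combined by container_type, each group by container_name
-- (names read from the current state, as Python reads the current objects), skip groups with
-- a single name, otherwise write the suffixed type to every member of each name group
def pvProcA (cs : List (PySem.Dict String String)) : List (PySem.Dict String String) :=
  let groups : PySem.Dict String (List Nat) :=
    cs.zipIdx.foldl (fun d p => d.modify (pvTy p.1) [] (· ++ [p.2])) PySem.Dict.empty
  groups.items.foldl (fun cs' g =>
    let nameGroups : PySem.Dict String (List Nat) :=
      g.2.foldl (fun d i => d.modify (pvNm (cs'.getD i PySem.Dict.empty)) [] (· ++ [i])) PySem.Dict.empty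
    if nameGroups.size ≤ 1 then cs'
    else (nameGroups.items.foldl (fun (st : List (PySem.Dict String String) × Int) ng =>
        let newType := if st.2 = 1 then g.1 else g.1 ++ "-" ++ PySem.Int.toStr st.2
        (ng.2.foldl (fun cs2 i => cs2.set i ((cs2.getD i PySem.Dict.empty).insert "container_type" newType)) st.1,
         st.2 + 1)) (cs', (1 : Int))).1) cs

def update_container_types_optimized (entities : List (List (String × String))) (result_entities : List (List (String × String))) : (List (List (String × String))) × (List (List (String × String))) :=
  -- combined = entities[:]; if result_entities: combined.append(result_entities[-1])
  let combined0 : List (PySem.Dict String String) := entities.map PySem.Dict.ofList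
  let combined0 := if result_entities ≠ [] then combined0 ++ [PySem.Dict.ofList (result_entities.getLast?.getD [])] else combined0
  let combined1 := pvProcA combined0
  -- return entities, result_entities: the same dict objects, as updated through combined
  let ents' := (combined1.take entities.length).map PySem.Dict.items
  let res' := if result_entities ≠ [] then
      (result_entities.dropLast.map (fun e => (PySem.Dict.ofList e).items)) ++ [(combined1.getLast?.getD PySem.Dict.empty).items]
    else result_entities.map (fun e => (PySem.Dict.ofList e).items)
  (ents', res')

-- ===== PORT B =====
-- one streaming pass: assigned_by_type : container_type -> (container_name -> assigned type)
def pvProcB (cs : List (PySem.Dict String String)) : List (PySem.Dict String String) :=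
  (cs.foldl (fun (st : PySem.Dict String (PySem.Dict String String) × List (PySem.Dict String String)) e =>
      let t := (e.get? "container_type").getD ""
      let n := (e.get? "container_name").getD ""
      let names := st.1.getD t PySem.Dict.empty
      let names' := if names.contains n then names
        else names.insert n (if names.size = 0 then t else t ++ "-" ++ PySem.Int.toStr ((names.size : Int) + 1))
      (st.1.insert t names', st.2 ++ [e.insert "container_type" (names'.getD n "")]))
    (PySem.Dict.empty, [])).2

def update_container_types_optimized_alt (entities : List (List (String × String))) (result_entities : List (List (String × String))) : (List (List (String × String))) × (List (List (String × String))) :=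
  let combined0 : List (PySem.Dict String String) :=
    entities.map PySem.Dict.ofList ++ (if result_entities ≠ [] then [PySem.Dict.ofList (result_entities.getLast?.getD [])] else [])
  let combined1 := pvProcB combined0
  let ents' := (combined1.take entities.length).map PySem.Dict.items
  let res' := if result_entities ≠ [] then
      (result_entities.dropLast.map (fun e => (PySem.Dict.ofList e).items)) ++ [(combined1.getLast?.getD PySem.Dict.empty).items]
    else result_entities.map (fun e => (PySem.Dict.ofList e).items)
  (ents', res')

-- ===== PRECONDITION & SPEC =====
-- Pre_ excludes exactly the inputs on which Python A raises KeyError: an entity of `entities`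
-- (or the last entity of `result_entities`) lacking the 'container_type' or 'container_name' key.
def pvHasKeys (e : List (String × String)) : Bool :=
  (PySem.Dict.ofList e).contains "container_type" && (PySem.Dict.ofList e).contains "container_name"

def Pre_update_container_types_optimized (entities : List (List (String × String))) (result_entities : List (List (String × String))) : Prop :=
  (∀ e ∈ entities, pvHasKeys e = true) ∧ (∀ e ∈ result_entities.getLast?.toList, pvHasKeys e = true)
instance (entities : List (List (String × String))) (result_entities : List (List (String × String))) : Decidable (Pre_update_container_types_optimized entities result_entities) := by unfold Pre_update_container_types_optimized; infer_instance

def pvWitness_update_container_types_optimized : (List (List (String × String))) × (List (List (String × String))) :=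
  ([[("container_type", "a"), ("container_name", "x")], [("container_type", "a"), ("container_name", "y")]],
   [[("container_type", "a"), ("container_name", "z")]])

def Spec_update_container_types_optimized (entities : List (List (String × String))) (result_entities : List (List (String × String))) (out : (List (List (String × String))) × (List (List (String × String)))) : Prop := out = update_container_types_optimized_alt entities result_entities
instance (entities : List (List (String × String))) (result_entities : List (List (String × String))) (out : (List (List (String × String))) × (List (List (String × String)))) : Decidable (Spec_update_container_types_optimized entities result_entities out) := by unfold Spec_update_container_types_optimized; infer_instance

-- ===== CLAIM (what is proved, stated in full; the proofs are below) =====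
def Claim_equal_update_container_types_optimized : Prop := ∀ (entities : List (List (String × String))) (result_entities : List (List (String × String))), Dom_update_container_types_optimized entities result_entities → Pre_update_container_types_optimized entities result_entities → Spec_update_container_types_optimized entities result_entities (update_container_types_optimized entities result_entities)

-- ===== LEMMAS AND PROOFS =====

-- the value assigned to the (k+1)-th distinct container_name of a type-t group
def pvVal (t : String) (k : Nat) : String := if k = 0 then t else t ++ "-" ++ PySem.Int.toStr ((k : Int) + 1)
-- the container_names of the type-t members of cs, in order
def pvNs (t : String) (cs : List (PySem.Dict String String)) : List String := (cs.filter (fun e => pvTy e == t)).map pvNm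
-- their distinct values in first-appearance order
def pvKs (t : String) (cs : List (PySem.Dict String String)) : List String := PySem.Set.ofList (pvNs t cs)
-- what B does to an entity of cs
def pvUpdB (cs : List (PySem.Dict String String)) (e : PySem.Dict String String) : PySem.Dict String String :=
  e.insert "container_type" (pvVal (pvTy e) ((pvKs (pvTy e) cs).idxOf (pvNm e)))
-- what A does to an entity of cs
def pvUpdA (cs : List (PySem.Dict String String)) (e : PySem.Dict String String) : PySem.Dict String String :=
  if (pvKs (pvTy e) cs).length ≤ 1 then e else pvUpdB cs e

-- B's per-type table after seeing the names ns
def pvNT (t : String) (ns : List String) : PySem.Dict String String :=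
  ns.foldl (fun nd n => if nd.contains n then nd else nd.insert n (pvVal t nd.size)) PySem.Dict.empty

lemma pvDd_append (ns : List String) (m : String) :
    PySem.Set.ofList (ns ++ [m]) = if m ∈ PySem.Set.ofList ns then PySem.Set.ofList ns else PySem.Set.ofList ns ++ [m] := by
  have h : PySem.Set.ofList (ns ++ [m]) = PySem.Set.add (PySem.Set.ofList ns) m := by
    simp [PySem.Set.ofList, List.foldl_append]
  rw [h]; simp [PySem.Set.add, PySem.Set.contains]

lemma pvIdxOf_prefix {n : String} (ns ms : List String) (h : n ∈ ns) :
    (PySem.Set.ofList (ns ++ ms)).idxOf n = (PySem.Set.ofList ns).idxOf n := by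
  induction ms using List.reverseRecOn with
  | nil => rw [List.append_nil]
  | append_singleton ms m ih =>
    rw [← List.append_assoc, pvDd_append]
    by_cases hm : m ∈ PySem.Set.ofList (ns ++ ms)
    · rw [if_pos hm, ih]
    · rw [if_neg hm, List.idxOf_append_of_mem, ih]
      exact (PySem.Set.mem_ofList _ _).2 (List.mem_append_left _ h)

lemma pvNs_append (t : String) (cs : List (PySem.Dict String String)) (e : PySem.Dict String String) :
    pvNs t (cs ++ [e]) = pvNs t cs ++ (if pvTy e == t then [pvNm e] else []) := by
  cases h : (pvTy e == t) <;> simp [pvNs, List.filter_append, h]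

lemma pvNT_step (t : String) (ns : List String) (m : String) :
    pvNT t (ns ++ [m]) = (if (pvNT t ns).contains m then pvNT t ns
      else (pvNT t ns).insert m (pvVal t (pvNT t ns).size)) := by
  simp [pvNT, List.foldl_append]

lemma pvSize_eq_keys_length {κ ν : Type} [BEq κ] (d : PySem.Dict κ ν) : d.size = d.keys.length := by
  simp [PySem.Dict.size, PySem.Dict.keys]

lemma pvNT_keys (t : String) (ns : List String) : (pvNT t ns).keys = PySem.Set.ofList ns := by
  induction ns using List.reverseRecOn with
  | nil => rfl
  | append_singleton ns m ih =>
    rw [pvNT_step, pvDd_append]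
    by_cases hm : m ∈ PySem.Set.ofList ns
    · rw [if_pos hm]
      rw [if_pos (by rw [(PySem.Dict.contains_iff_mem_keys _ _), ih]; exact hm), ih]
    · rw [if_neg hm]
      have hc : (pvNT t ns).contains m = false := by
        by_contra hcc
        exact hm (ih ▸ (PySem.Dict.contains_iff_mem_keys _ _).1 (by simpa using hcc))
      rw [if_neg (by simp [hc]), PySem.Dict.keys_insert_of_not_contains _ _ hc, ih]

lemma pvNT_getD (t : String) (ns : List String) {n : String} (h : n ∈ ns) :
    (pvNT t ns).getD n "" = pvVal t ((PySem.Set.ofList ns).idxOf n) := by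
  induction ns using List.reverseRecOn with
  | nil => simp at h
  | append_singleton ns m ih =>
    rw [pvNT_step, pvDd_append]
    by_cases hm : m ∈ PySem.Set.ofList ns
    · rw [if_pos hm]
      rw [if_pos (by rw [(PySem.Dict.contains_iff_mem_keys _ _), pvNT_keys]; exact hm)]
      have hn : n ∈ ns := by
        rcases List.mem_append.1 h with h1 | h1
        · exact h1
        · simp at h1; exact h1 ▸ (PySem.Set.mem_ofList _ _).1 hm
      exact ih hn
    · rw [if_neg hm]
      have hc : (pvNT t ns).contains m = false := by
        by_contra hcc
        exact hm ((pvNT_keys t ns) ▸ (PySem.Dict.contains_iff_mem_keys _ _).1 (by simpa using hcc))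
      rw [if_neg (by simp [hc])]
      by_cases hnm : n = m
      · subst hnm
        rw [PySem.Dict.getD_insert, if_pos rfl, pvSize_eq_keys_length, pvNT_keys]
        rw [List.idxOf_append, if_neg (by simpa using hm)]
        simp
      · rw [PySem.Dict.getD_insert, if_neg hnm]
        have hn : n ∈ ns := by
          rcases List.mem_append.1 h with h1 | h1
          · exact h1
          · simp at h1; exact absurd h1 hnm
        rw [ih hn, List.idxOf_append_of_mem ((PySem.Set.mem_ofList _ _).2 hn)]

-- ---- B side ----

-- B's fold body, named for the proofs
def pvFb (st : PySem.Dict String (PySem.Dict String String) × List (PySem.Dict String String))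
    (e : PySem.Dict String String) :
    PySem.Dict String (PySem.Dict String String) × List (PySem.Dict String String) :=
  let t := (e.get? "container_type").getD ""
  let n := (e.get? "container_name").getD ""
  let names := st.1.getD t PySem.Dict.empty
  let names' := if names.contains n then names
    else names.insert n (if names.size = 0 then t else t ++ "-" ++ PySem.Int.toStr ((names.size : Int) + 1))
  (st.1.insert t names', st.2 ++ [e.insert "container_type" (names'.getD n "")])

lemma pvFb_step (st : PySem.Dict String (PySem.Dict String String) × List (PySem.Dict String String))
    (e : PySem.Dict String String)
    (ns : List String) (h : st.1.getD (pvTy e) PySem.Dict.empty = pvNT (pvTy e) ns) :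
    pvFb st e = (st.1.insert (pvTy e) (pvNT (pvTy e) (ns ++ [pvNm e])),
      st.2 ++ [e.insert "container_type" ((pvNT (pvTy e) (ns ++ [pvNm e])).getD (pvNm e) "")]) := by
  have hstep : pvNT (pvTy e) (ns ++ [pvNm e]) =
      (if (pvNT (pvTy e) ns).contains (pvNm e) then pvNT (pvTy e) ns
        else (pvNT (pvTy e) ns).insert (pvNm e) (pvVal (pvTy e) (pvNT (pvTy e) ns).size)) :=
    pvNT_step _ _ _
  have h1 : (e.get? "container_type").getD "" = pvTy e := rfl
  have h2 : (e.get? "container_name").getD "" = pvNm e := rfl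
  simp only [pvVal] at hstep
  simp only [pvFb, h1, h2, h, hstep]

lemma pvNs_app (t : String) (xs ys : List (PySem.Dict String String)) :
    pvNs t (xs ++ ys) = pvNs t xs ++ pvNs t ys := by
  simp [pvNs, List.filter_append]

lemma pvFb_table (pre : List (PySem.Dict String String)) : ∀ (t : String),
    ((pre.foldl pvFb (PySem.Dict.empty, [])).1).getD t PySem.Dict.empty = pvNT t (pvNs t pre) := by
  induction pre using List.reverseRecOn with
  | nil => intro t; simp [pvNT, pvNs, PySem.Dict.getD_empty]
  | append_singleton pre e ih =>
    intro t
    rw [List.foldl_append, List.foldl_cons, List.foldl_nil,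
      pvFb_step _ e (pvNs (pvTy e) pre) (ih (pvTy e))]
    by_cases ht : t = pvTy e
    · subst ht
      rw [PySem.Dict.getD_insert, if_pos rfl, pvNs_append, if_pos (by simp)]
    · rw [PySem.Dict.getD_insert, if_neg ht, ih, pvNs_append, if_neg (by simpa using (Ne.symm ht)), List.append_nil]

lemma pvFb_out (cs : List (PySem.Dict String String)) : ∀ pre,
    ((pre ++ cs).foldl pvFb (PySem.Dict.empty, [])).2 =
      (pre.foldl pvFb (PySem.Dict.empty, [])).2 ++ cs.map (pvUpdB (pre ++ cs)) := by
  induction cs with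
  | nil => simp
  | cons e cs ih =>
    intro pre
    have hsplit : pre ++ e :: cs = (pre ++ [e]) ++ cs := by simp
    rw [hsplit, ih (pre ++ [e])]
    rw [List.foldl_append, List.foldl_cons, List.foldl_nil,
      pvFb_step _ e (pvNs (pvTy e) pre) (pvFb_table pre (pvTy e))]
    have hv : (pvNT (pvTy e) (pvNs (pvTy e) pre ++ [pvNm e])).getD (pvNm e) ""
        = pvVal (pvTy e) ((pvKs (pvTy e) ((pre ++ [e]) ++ cs)).idxOf (pvNm e)) := by
      rw [pvNT_getD (pvTy e) (pvNs (pvTy e) pre ++ [pvNm e]) (List.mem_append_right _ (List.mem_singleton_self _))]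
      rw [pvKs, pvNs_app, pvNs_append, if_pos (by simp)]
      rw [pvIdxOf_prefix (pvNs (pvTy e) pre ++ [pvNm e]) (pvNs (pvTy e) cs)
        (List.mem_append_right _ (List.mem_singleton_self _))]
    simp only [hv]
    have hupd : pvUpdB ((pre ++ [e]) ++ cs) e
        = e.insert "container_type" (pvVal (pvTy e) ((pvKs (pvTy e) ((pre ++ [e]) ++ cs)).idxOf (pvNm e))) := rfl
    rw [List.map_cons, ← hupd, List.append_assoc, List.singleton_append]

lemma pvProcB_eq (cs : List (PySem.Dict String String)) : pvProcB cs = cs.map (pvUpdB cs) := by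
  have h := pvFb_out cs []
  simpa using h

-- ---- A side ----

-- the positions of the type-t entities of cs (A's entity_type_to_entities group, as positions)
def pvIdxsT (cs : List (PySem.Dict String String)) (t : String) : List Nat :=
  (cs.zipIdx.filter (fun p => pvTy p.1 == t)).map (·.2)
-- the positions of the name-n members of that group (A's name_to_entities group)
def pvNGd (cs : List (PySem.Dict String String)) (t n : String) : List Nat :=
  (pvIdxsT cs t).filter (fun i => pvNm (cs.getD i PySem.Dict.empty) == n)
def pvTlist (cs : List (PySem.Dict String String)) : List String := PySem.Set.ofList (cs.map pvTy)

lemma pvZip_getD (cs : List (PySem.Dict String String)) :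
    ∀ p ∈ cs.zipIdx, cs.getD p.2 PySem.Dict.empty = p.1 := by
  intro p hp
  obtain ⟨x, i⟩ := p
  obtain ⟨h1, h2, h3⟩ := List.mem_zipIdx hp
  simp only at h2 h3 ⊢
  rw [List.getD_eq_getElem _ _ (by omega)]
  simp at h3; exact h3.symm

lemma pvZip_lt (cs : List (PySem.Dict String String)) : ∀ p ∈ cs.zipIdx, p.2 < cs.length := by
  intro p hp
  obtain ⟨x, i⟩ := p
  have := List.mem_zipIdx hp
  simp only at this ⊢
  omega

lemma pvMem_zipIdx (cs : List (PySem.Dict String String)) {j : Nat} (h : j < cs.length) :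
    (cs[j], j) ∈ cs.zipIdx := by
  rw [List.mem_zipIdx_iff_getElem?]
  simp [List.getElem?_eq_getElem h]

lemma pvIdxsT_lt (cs : List (PySem.Dict String String)) (t : String) :
    ∀ i ∈ pvIdxsT cs t, i < cs.length := by
  intro i hi
  obtain ⟨p, hp, rfl⟩ := List.mem_map.1 hi
  exact pvZip_lt cs p (List.mem_of_mem_filter hp)

lemma pvIdxsT_ty (cs : List (PySem.Dict String String)) (t : String) :
    ∀ i ∈ pvIdxsT cs t, pvTy (cs.getD i PySem.Dict.empty) = t := by
  intro i hi
  obtain ⟨p, hp, rfl⟩ := List.mem_map.1 hi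
  rw [pvZip_getD cs p (List.mem_of_mem_filter hp)]
  simpa using List.of_mem_filter hp

lemma pvIdxsT_mem (cs : List (PySem.Dict String String)) (t : String) {j : Nat}
    (hj : j < cs.length) (ht : pvTy (cs.getD j PySem.Dict.empty) = t) : j ∈ pvIdxsT cs t := by
  have hty : pvTy cs[j] = t := by rwa [List.getD_eq_getElem _ _ hj] at ht
  apply List.mem_map.2
  refine ⟨(cs[j], j), ?_, rfl⟩
  refine List.mem_filter.2 ⟨pvMem_zipIdx cs hj, ?_⟩
  simpa using hty

lemma pvIdxsT_nodup (cs : List (PySem.Dict String String)) (t : String) : (pvIdxsT cs t).Nodup := by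
  have hsub : (pvIdxsT cs t).Sublist (cs.zipIdx.map (·.2)) :=
    List.Sublist.map _ (List.filter_sublist (l := cs.zipIdx))
  have hnd : (cs.zipIdx.map (·.2)).Nodup := by
    have h := List.zipIdx_map_snd 0 cs
    have : (cs.zipIdx.map (·.2)) = List.range' 0 cs.length := h
    rw [this]
    exact List.nodup_range' 1
  exact hnd.sublist hsub

lemma pvAux_names (cs : List (PySem.Dict String String)) (t : String) :
    ∀ (l : List ((PySem.Dict String String) × Nat)),
      (∀ p ∈ l, cs.getD p.2 PySem.Dict.empty = p.1) →
      ((l.filter (fun p => pvTy p.1 == t)).map (·.2)).map (fun i => pvNm (cs.getD i PySem.Dict.empty))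
        = ((l.map (·.1)).filter (fun e => pvTy e == t)).map pvNm := by
  intro l
  induction l with
  | nil => intro _; rfl
  | cons p l ih =>
    intro h
    have hp := h p (List.mem_cons_self ..)
    have hrest := fun q hq => h q (List.mem_cons_of_mem _ hq)
    cases hpt : (pvTy p.1 == t) with
    | false =>
      simp only [List.map_cons, List.filter_cons, hpt, Bool.false_eq_true, if_false]
      exact ih hrest
    | true =>
      simp only [List.map_cons, List.filter_cons, hpt, if_true]
      rw [hp, ih hrest]

lemma pvIdxsT_names (cs : List (PySem.Dict String String)) (t : String) :
    (pvIdxsT cs t).map (fun i => pvNm (cs.getD i PySem.Dict.empty)) = pvNs t cs := by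
  have := pvAux_names cs t cs.zipIdx (pvZip_getD cs)
  rw [List.zipIdx_map_fst] at this
  simpa [pvIdxsT, pvNs] using this

lemma pvItems_eq {κ ν : Type} [BEq κ] [LawfulBEq κ] (d : PySem.Dict κ ν) (d0 : ν)
    (h : d.keys.Nodup) : d.items = d.keys.map (fun k => (k, d.getD k d0)) := by
  have : d.keys.map (fun k => (k, d.getD k d0)) = d.items.map (fun p => (p.1, d.getD p.1 d0)) := by
    simp [PySem.Dict.keys, List.map_map]
  rw [this]
  have : d.items.map (fun p => (p.1, d.getD p.1 d0)) = d.items.map id := by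
    apply List.map_congr_left
    intro p hp
    have : d.getD p.1 d0 = p.2 := PySem.Dict.getD_of_mem_items d (by simpa using hp) h d0
    simp [this]
  rw [this, List.map_id]

-- the grouping dict of A, characterized
lemma pvGroups_keys (cs : List (PySem.Dict String String)) :
    (cs.zipIdx.foldl (fun d p => d.modify (pvTy p.1) [] (· ++ [p.2])) PySem.Dict.empty).keys = pvTlist cs := by
  rw [PySem.Dict.keys_foldl_modify_key cs.zipIdx (fun p => pvTy p.1) [] (fun _ p => (· ++ [p.2])) PySem.Dict.empty]
  rw [PySem.Dict.keys_empty]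
  show PySem.Set.ofList _ = _
  have hm : cs.zipIdx.map (fun p => pvTy p.1) = cs.map pvTy := by
    rw [show (fun p : (PySem.Dict String String) × Nat => pvTy p.1) = pvTy ∘ Prod.fst from rfl,
      ← List.map_map, List.zipIdx_map_fst]
  rw [pvTlist, hm]

lemma pvGroups_knodup (cs : List (PySem.Dict String String)) :
    (cs.zipIdx.foldl (fun d p => d.modify (pvTy p.1) [] (· ++ [p.2])) PySem.Dict.empty).keys.Nodup :=
  PySem.Dict.nodup_keys_foldl_modify_key cs.zipIdx (fun p => pvTy p.1) [] (fun _ p => (· ++ [p.2]))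
    PySem.Dict.empty PySem.Dict.nodup_keys_empty

lemma pvGroups_getD (cs : List (PySem.Dict String String)) (t : String) :
    (cs.zipIdx.foldl (fun d p => d.modify (pvTy p.1) [] (· ++ [p.2])) PySem.Dict.empty).getD t [] = pvIdxsT cs t := by
  have hmap : cs.zipIdx.foldl (fun d p => d.modify (pvTy p.1) [] (· ++ [p.2])) PySem.Dict.empty
      = (cs.zipIdx.map (fun p => (pvTy p.1, p.2))).foldl (fun d q => d.modify q.1 [] (· ++ [q.2])) PySem.Dict.empty := by
    rw [List.foldl_map]
  rw [hmap, PySem.Dict.getD_foldl_modify_append]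
  rw [List.filter_map]
  simp [pvIdxsT, PySem.Dict.getD_empty, Function.comp_def]

lemma pvGroups_items (cs : List (PySem.Dict String String)) :
    (cs.zipIdx.foldl (fun d p => d.modify (pvTy p.1) [] (· ++ [p.2])) PySem.Dict.empty).items
      = (pvTlist cs).map (fun t => (t, pvIdxsT cs t)) := by
  rw [pvItems_eq _ [] (pvGroups_knodup cs), pvGroups_keys]
  exact List.map_congr_left (fun t _ => by rw [pvGroups_getD])

-- the name-grouping dict of one type group, characterized (reads from cs itself)
lemma pvNG_keys (cs : List (PySem.Dict String String)) (t : String) :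
    ((pvIdxsT cs t).foldl (fun d i => d.modify (pvNm (cs.getD i PySem.Dict.empty)) [] (· ++ [i])) PySem.Dict.empty).keys = pvKs t cs := by
  rw [PySem.Dict.keys_foldl_modify_key (pvIdxsT cs t) (fun i => pvNm (cs.getD i PySem.Dict.empty)) [] (fun _ i => (· ++ [i])) PySem.Dict.empty]
  rw [PySem.Dict.keys_empty]
  show PySem.Set.ofList _ = _
  rw [pvIdxsT_names, pvKs]

lemma pvNG_knodup (cs : List (PySem.Dict String String)) (t : String) :
    ((pvIdxsT cs t).foldl (fun d i => d.modify (pvNm (cs.getD i PySem.Dict.empty)) [] (· ++ [i])) PySem.Dict.empty).keys.Nodup :=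
  PySem.Dict.nodup_keys_foldl_modify_key _ _ [] (fun _ i => (· ++ [i])) PySem.Dict.empty PySem.Dict.nodup_keys_empty

lemma pvNG_getD (cs : List (PySem.Dict String String)) (t n : String) :
    ((pvIdxsT cs t).foldl (fun d i => d.modify (pvNm (cs.getD i PySem.Dict.empty)) [] (· ++ [i])) PySem.Dict.empty).getD n [] = pvNGd cs t n := by
  have hmap : (pvIdxsT cs t).foldl (fun d i => d.modify (pvNm (cs.getD i PySem.Dict.empty)) [] (· ++ [i])) PySem.Dict.empty
      = ((pvIdxsT cs t).map (fun i => (pvNm (cs.getD i PySem.Dict.empty), i))).foldl (fun d q => d.modify q.1 [] (· ++ [q.2])) PySem.Dict.empty := by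
    rw [List.foldl_map]
  rw [hmap, PySem.Dict.getD_foldl_modify_append]
  rw [List.filter_map]
  simp [pvNGd, PySem.Dict.getD_empty, Function.comp_def]

lemma pvNG_size (cs : List (PySem.Dict String String)) (t : String) :
    ((pvIdxsT cs t).foldl (fun d i => d.modify (pvNm (cs.getD i PySem.Dict.empty)) [] (· ++ [i])) PySem.Dict.empty).size = (pvKs t cs).length := by
  rw [pvSize_eq_keys_length, pvNG_keys]

lemma pvNG_items (cs : List (PySem.Dict String String)) (t : String) :
    ((pvIdxsT cs t).foldl (fun d i => d.modify (pvNm (cs.getD i PySem.Dict.empty)) [] (· ++ [i])) PySem.Dict.empty).items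
      = (pvKs t cs).map (fun n => (n, pvNGd cs t n)) := by
  rw [pvItems_eq _ [] (pvNG_knodup cs t), pvNG_keys]
  exact List.map_congr_left (fun n _ => by rw [pvNG_getD])

lemma pvGetD_set (l : List (PySem.Dict String String)) (i j : Nat) (a : PySem.Dict String String) :
    (l.set i a).getD j PySem.Dict.empty
      = if i = j ∧ i < l.length then a else l.getD j PySem.Dict.empty := by
  rw [List.getD_eq_getElem?_getD, List.getD_eq_getElem?_getD, List.getElem?_set]
  by_cases hij : i = j
  · subst hij
    by_cases hlen : i < l.length
    · simp [hlen]
    · simp [hlen]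
  · simp [hij]

lemma pvSetFold (v : String) : ∀ (g : List Nat) (l : List (PySem.Dict String String)),
    g.Nodup → (∀ i ∈ g, i < l.length) →
    (g.foldl (fun cs2 i => cs2.set i ((cs2.getD i PySem.Dict.empty).insert "container_type" v)) l).length = l.length
    ∧ ∀ j, (g.foldl (fun cs2 i => cs2.set i ((cs2.getD i PySem.Dict.empty).insert "container_type" v)) l).getD j PySem.Dict.empty
        = if j ∈ g then (l.getD j PySem.Dict.empty).insert "container_type" v else l.getD j PySem.Dict.empty := by
  intro g
  induction g with
  | nil => intro l _ _; exact ⟨rfl, fun j => by simp⟩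
  | cons i g ih =>
    intro l hnd hlt
    have hi : i < l.length := hlt i (List.mem_cons_self ..)
    have hnotmem : i ∉ g := (List.nodup_cons.1 hnd).1
    set l' := l.set i ((l.getD i PySem.Dict.empty).insert "container_type" v) with hl'
    have hlen' : l'.length = l.length := List.length_set
    obtain ⟨ihlen, ihget⟩ := ih l' (List.nodup_cons.1 hnd).2
      (fun k hk => hlen' ▸ hlt k (List.mem_cons_of_mem _ hk))
    constructor
    · rw [List.foldl_cons, ← hl', ihlen, hlen']
    · intro j
      rw [List.foldl_cons, ← hl', ihget j]
      by_cases hj : j ∈ g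
      · rw [if_pos hj, if_pos (List.mem_cons_of_mem _ hj)]
        have hl'j : l'.getD j PySem.Dict.empty = l.getD j PySem.Dict.empty := by
          rw [hl', pvGetD_set, if_neg (fun h => hnotmem (by rw [h.1]; exact hj))]
        rw [hl'j]
      · rw [if_neg hj]
        by_cases hij : i = j
        · subst hij
          rw [if_pos (List.mem_cons_self ..), hl', pvGetD_set, if_pos ⟨rfl, hi⟩]
        · rw [if_neg (by simp only [List.mem_cons]; rintro (hh | hh); exact hij hh.symm; exact hj hh),
            hl', pvGetD_set, if_neg (fun h => hij h.1)]

lemma pvNm_mem_Ks (cs : List (PySem.Dict String String)) (t : String) {j : Nat}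
    (hj : j < cs.length) (ht : pvTy (cs.getD j PySem.Dict.empty) = t) :
    pvNm (cs.getD j PySem.Dict.empty) ∈ pvKs t cs := by
  rw [pvKs, PySem.Set.mem_ofList, ← pvIdxsT_names]
  exact List.mem_map.2 ⟨j, pvIdxsT_mem cs t hj ht, rfl⟩

lemma pvMem_NGd (cs : List (PySem.Dict String String)) (t n : String) (j : Nat) :
    j ∈ pvNGd cs t n ↔ j ∈ pvIdxsT cs t ∧ pvNm (cs.getD j PySem.Dict.empty) = n := by
  simp [pvNGd, List.mem_filter]

def pvIFold (cs : List (PySem.Dict String String)) (t : String) (rest : List String)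
    (l : List (PySem.Dict String String)) (c : Int) : List (PySem.Dict String String) × Int :=
  rest.foldl (fun (st : List (PySem.Dict String String) × Int) n =>
    ((pvNGd cs t n).foldl (fun cs2 i => cs2.set i ((cs2.getD i PySem.Dict.empty).insert "container_type"
        (if st.2 = 1 then t else t ++ "-" ++ PySem.Int.toStr st.2))) st.1, st.2 + 1)) (l, c)

lemma pvInnerFold (cs : List (PySem.Dict String String)) (t : String) :
    ∀ (rest done : List String) (l : List (PySem.Dict String String)),
    pvKs t cs = done ++ rest → l.length = cs.length →
    (∀ j, j < cs.length → pvTy (cs.getD j PySem.Dict.empty) = t →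
      pvNm (cs.getD j PySem.Dict.empty) ∈ rest → l.getD j PySem.Dict.empty = cs.getD j PySem.Dict.empty) →
    (pvIFold cs t rest l ((done.length : Int) + 1)).1.length = cs.length
    ∧ ∀ j, (pvIFold cs t rest l ((done.length : Int) + 1)).1.getD j PySem.Dict.empty
        = if j < cs.length ∧ pvTy (cs.getD j PySem.Dict.empty) = t ∧ pvNm (cs.getD j PySem.Dict.empty) ∈ rest
          then (cs.getD j PySem.Dict.empty).insert "container_type"
            (pvVal t ((pvKs t cs).idxOf (pvNm (cs.getD j PySem.Dict.empty))))
          else l.getD j PySem.Dict.empty := by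
  intro rest
  induction rest with
  | nil =>
    intro done l _ hlen _
    exact ⟨by simpa [pvIFold] using hlen, fun j => by simp [pvIFold]⟩
  | cons n rest ih =>
    intro done l hK hlen H
    have hKnd : (pvKs t cs).Nodup := PySem.Set.nodup_ofList _
    have hnd : (done ++ n :: rest).Nodup := hK ▸ hKnd
    have hn_done : n ∉ done := fun hmem =>
      (List.disjoint_of_nodup_append hnd) hmem (List.mem_cons_self ..)
    have hn_rest : n ∉ rest := by
      have := (List.nodup_append.1 hnd).2.1
      exact (List.nodup_cons.1 this).1
    -- the value written for the head name n
    have hidx : (pvKs t cs).idxOf n = done.length := by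
      rw [hK, List.idxOf_append, if_neg hn_done, List.idxOf_cons_self]
      omega
    have hval : (if ((done.length : Int) + 1) = 1 then t else t ++ "-" ++ PySem.Int.toStr ((done.length : Int) + 1))
        = pvVal t ((pvKs t cs).idxOf n) := by
      rw [hidx]
      by_cases h0 : done.length = 0
      · simp [pvVal, h0]
      · rw [if_neg (by omega), pvVal, if_neg h0]
    -- one step of the fold
    have hg_nd : (pvNGd cs t n).Nodup := (pvIdxsT_nodup cs t).filter _
    have hg_lt : ∀ i ∈ pvNGd cs t n, i < l.length := fun i hi =>
      hlen ▸ pvIdxsT_lt cs t i (List.mem_of_mem_filter hi)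
    obtain ⟨hslen, hsget⟩ := pvSetFold
      (if ((done.length : Int) + 1) = 1 then t else t ++ "-" ++ PySem.Int.toStr ((done.length : Int) + 1))
      (pvNGd cs t n) l hg_nd hg_lt
    set l2 := (pvNGd cs t n).foldl (fun cs2 i => cs2.set i ((cs2.getD i PySem.Dict.empty).insert "container_type"
        (if ((done.length : Int) + 1) = 1 then t else t ++ "-" ++ PySem.Int.toStr ((done.length : Int) + 1)))) l with hl2
    have hstep : pvIFold cs t (n :: rest) l ((done.length : Int) + 1)
        = pvIFold cs t rest l2 (((done ++ [n]).length : Int) + 1) := by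
      simp only [pvIFold, List.foldl_cons, ← hl2, List.length_append, List.length_cons, List.length_nil]
      norm_num
    have hH2 : ∀ j, j < cs.length → pvTy (cs.getD j PySem.Dict.empty) = t →
        pvNm (cs.getD j PySem.Dict.empty) ∈ rest → l2.getD j PySem.Dict.empty = cs.getD j PySem.Dict.empty := by
      intro j hj hty hnm
      have hjg : j ∉ pvNGd cs t n := by
        rw [pvMem_NGd]
        rintro ⟨-, hn⟩
        exact hn_rest (hn ▸ hnm)
      rw [hsget j, if_neg hjg]
      exact H j hj hty (List.mem_cons_of_mem _ hnm)
    obtain ⟨ihlen, ihget⟩ := ih (done ++ [n]) l2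
      (by rw [hK]; simp) (hslen.trans hlen) hH2
    rw [hstep]
    refine ⟨ihlen, fun j => ?_⟩
    rw [ihget j]
    by_cases hj : j < cs.length
    · by_cases hty : pvTy (cs.getD j PySem.Dict.empty) = t
      · by_cases hnm : pvNm (cs.getD j PySem.Dict.empty) ∈ rest
        · rw [if_pos ⟨hj, hty, hnm⟩, if_pos ⟨hj, hty, List.mem_cons_of_mem _ hnm⟩]
        · rw [if_neg (fun h => hnm h.2.2)]
          by_cases hnmn : pvNm (cs.getD j PySem.Dict.empty) = n
          · rw [if_pos ⟨hj, hty, by rw [hnmn]; exact List.mem_cons_self ..⟩]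
            have hjg : j ∈ pvNGd cs t n := (pvMem_NGd cs t n j).2 ⟨pvIdxsT_mem cs t hj hty, hnmn⟩
            rw [hsget j, if_pos hjg, H j hj hty (by rw [hnmn]; exact List.mem_cons_self ..), hnmn, hval]
          · rw [if_neg (by rintro ⟨-, -, hm⟩; rcases List.mem_cons.1 hm with h | h; exact hnmn h; exact hnm h)]
            have hjg : j ∉ pvNGd cs t n := by
              rw [pvMem_NGd]; rintro ⟨-, hn⟩; exact hnmn hn
            rw [hsget j, if_neg hjg]
      · rw [if_neg (fun h => hty h.2.1), if_neg (fun h => hty h.2.1)]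
        have hjg : j ∉ pvNGd cs t n := by
          rw [pvMem_NGd]
          rintro ⟨hmem, -⟩
          exact hty (pvIdxsT_ty cs t j hmem)
        rw [hsget j, if_neg hjg]
    · rw [if_neg (fun h => hj h.1), if_neg (fun h => hj h.1)]
      have hjg : j ∉ pvNGd cs t n := fun hm => hj (hlen ▸ hg_lt j hm)
      rw [hsget j, if_neg hjg]

-- ---- A side, outer loop ----

-- A's outer loop body, named for the proofs (definitionally the lambda in pvProcA)
def pvObody (cs' : List (PySem.Dict String String)) (g : String × List Nat) : List (PySem.Dict String String) :=
  let nameGroups : PySem.Dict String (List Nat) :=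
    g.2.foldl (fun d i => d.modify (pvNm (cs'.getD i PySem.Dict.empty)) [] (· ++ [i])) PySem.Dict.empty
  if nameGroups.size ≤ 1 then cs'
  else (nameGroups.items.foldl (fun (st : List (PySem.Dict String String) × Int) ng =>
      let newType := if st.2 = 1 then g.1 else g.1 ++ "-" ++ PySem.Int.toStr st.2
      (ng.2.foldl (fun cs2 i => cs2.set i ((cs2.getD i PySem.Dict.empty).insert "container_type" newType)) st.1,
       st.2 + 1)) (cs', (1 : Int))).1

lemma pvObody_eq (cs cs' : List (PySem.Dict String String)) (t : String)
    (Hagree : ∀ i ∈ pvIdxsT cs t, cs'.getD i PySem.Dict.empty = cs.getD i PySem.Dict.empty) :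
    pvObody cs' (t, pvIdxsT cs t)
      = if (pvKs t cs).length ≤ 1 then cs' else (pvIFold cs t (pvKs t cs) cs' 1).1 := by
  have hng : (pvIdxsT cs t).foldl (fun d i => d.modify (pvNm (cs'.getD i PySem.Dict.empty)) [] (· ++ [i])) PySem.Dict.empty
      = (pvIdxsT cs t).foldl (fun d i => d.modify (pvNm (cs.getD i PySem.Dict.empty)) [] (· ++ [i])) PySem.Dict.empty :=
    PySem.List.foldl_congr_mem _ _ _ _ (fun d i hi => by rw [Hagree i hi])
  unfold pvObody
  simp only [hng, pvNG_size, pvNG_items]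
  by_cases hle : (pvKs t cs).length ≤ 1
  · rw [if_pos hle, if_pos hle]
  · rw [if_neg hle, if_neg hle, List.foldl_map]
    rfl

lemma pvOuterFold (cs : List (PySem.Dict String String)) :
    ∀ (rest done : List String) (cs' : List (PySem.Dict String String)),
    pvTlist cs = done ++ rest → cs'.length = cs.length →
    (∀ j, cs'.getD j PySem.Dict.empty
        = if j < cs.length ∧ pvTy (cs.getD j PySem.Dict.empty) ∈ done
          then pvUpdA cs (cs.getD j PySem.Dict.empty) else cs.getD j PySem.Dict.empty) →
    (rest.foldl (fun cs'' t => pvObody cs'' (t, pvIdxsT cs t)) cs').length = cs.length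
    ∧ ∀ j, (rest.foldl (fun cs'' t => pvObody cs'' (t, pvIdxsT cs t)) cs').getD j PySem.Dict.empty
        = if j < cs.length ∧ pvTy (cs.getD j PySem.Dict.empty) ∈ done ++ rest
          then pvUpdA cs (cs.getD j PySem.Dict.empty) else cs.getD j PySem.Dict.empty := by
  intro rest
  induction rest with
  | nil =>
    intro done cs' _ hlen hinv
    exact ⟨hlen, fun j => by rw [List.foldl_nil, hinv j, List.append_nil]⟩
  | cons t rest ih =>
    intro done cs' hT hlen hinv
    have hTnd : (pvTlist cs).Nodup := PySem.Set.nodup_ofList _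
    have hnd : (done ++ t :: rest).Nodup := hT ▸ hTnd
    have ht_done : t ∉ done := fun hmem =>
      (List.disjoint_of_nodup_append hnd) hmem (List.mem_cons_self ..)
    have Hagree : ∀ i ∈ pvIdxsT cs t, cs'.getD i PySem.Dict.empty = cs.getD i PySem.Dict.empty := by
      intro i hi
      rw [hinv i, if_neg (fun h => ht_done ((pvIdxsT_ty cs t i hi) ▸ h.2))]
    rw [List.foldl_cons, pvObody_eq cs cs' t Hagree]
    by_cases hle : (pvKs t cs).length ≤ 1
    · rw [if_pos hle]
      have hinv' : ∀ j, cs'.getD j PySem.Dict.empty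
          = if j < cs.length ∧ pvTy (cs.getD j PySem.Dict.empty) ∈ done ++ [t]
            then pvUpdA cs (cs.getD j PySem.Dict.empty) else cs.getD j PySem.Dict.empty := by
        intro j
        rw [hinv j]
        by_cases hj : j < cs.length
        · by_cases hd : pvTy (cs.getD j PySem.Dict.empty) ∈ done
          · rw [if_pos ⟨hj, hd⟩, if_pos ⟨hj, List.mem_append_left _ hd⟩]
          · rw [if_neg (fun h => hd h.2)]
            by_cases hdt : pvTy (cs.getD j PySem.Dict.empty) = t
            · rw [if_pos ⟨hj, List.mem_append_right _ (by rw [hdt]; exact List.mem_singleton_self _)⟩]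
              rw [pvUpdA, hdt, if_pos hle]
            · have hnotin : ¬(j < cs.length ∧ pvTy (cs.getD j PySem.Dict.empty) ∈ done ++ [t]) := by
                rintro ⟨-, hm⟩
                rcases List.mem_append.1 hm with h | h
                · exact hd h
                · exact hdt (by simpa using h)
              rw [if_neg hnotin]
        · rw [if_neg (fun h => hj h.1), if_neg (fun h => hj h.1)]
      obtain ⟨ihlen, ihget⟩ := ih (done ++ [t]) cs' (by rw [hT]; simp) hlen hinv'
      refine ⟨ihlen, fun j => ?_⟩
      rw [ihget j]
      have : done ++ [t] ++ rest = done ++ t :: rest := by simp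
      rw [this]
    · rw [if_neg hle]
      have hinner := pvInnerFold cs t (pvKs t cs) [] cs' rfl hlen
        (fun j hj hty _ => by rw [hinv j, if_neg (fun h => ht_done (hty ▸ h.2))])
      simp only [List.length_nil, Nat.cast_zero, zero_add] at hinner
      obtain ⟨hilen, higet⟩ := hinner
      have hinv' : ∀ j, (pvIFold cs t (pvKs t cs) cs' 1).1.getD j PySem.Dict.empty
          = if j < cs.length ∧ pvTy (cs.getD j PySem.Dict.empty) ∈ done ++ [t]
            then pvUpdA cs (cs.getD j PySem.Dict.empty) else cs.getD j PySem.Dict.empty := by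
        intro j
        rw [higet j]
        by_cases hj : j < cs.length
        · by_cases hdt : pvTy (cs.getD j PySem.Dict.empty) = t
          · have hnm : pvNm (cs.getD j PySem.Dict.empty) ∈ pvKs t cs := pvNm_mem_Ks cs t hj hdt
            rw [if_pos ⟨hj, hdt, hnm⟩,
              if_pos ⟨hj, List.mem_append_right _ (by rw [hdt]; exact List.mem_singleton_self _)⟩]
            rw [pvUpdA, hdt, if_neg hle, pvUpdB, hdt]
          · rw [if_neg (fun h => hdt h.2.1), hinv j]
            by_cases hd : pvTy (cs.getD j PySem.Dict.empty) ∈ done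
            · rw [if_pos ⟨hj, hd⟩, if_pos ⟨hj, List.mem_append_left _ hd⟩]
            · have hnotin : ¬(j < cs.length ∧ pvTy (cs.getD j PySem.Dict.empty) ∈ done ++ [t]) := by
                rintro ⟨-, hm⟩
                rcases List.mem_append.1 hm with h | h
                · exact hd h
                · exact hdt (by simpa using h)
              rw [if_neg (fun h => hd h.2), if_neg hnotin]
        · rw [if_neg (fun h => hj h.1), if_neg (fun h => hj h.1), hinv j, if_neg (fun h => hj h.1)]
      obtain ⟨ihlen, ihget⟩ := ih (done ++ [t]) _ (by rw [hT]; simp) hilen hinv'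
      refine ⟨ihlen, fun j => ?_⟩
      rw [ihget j]
      have : done ++ [t] ++ rest = done ++ t :: rest := by simp
      rw [this]

lemma pvProcA_eq (cs : List (PySem.Dict String String)) : pvProcA cs = cs.map (pvUpdA cs) := by
  have hdef : pvProcA cs = (pvTlist cs).foldl (fun cs'' t => pvObody cs'' (t, pvIdxsT cs t)) cs := by
    show (cs.zipIdx.foldl (fun d p => d.modify (pvTy p.1) [] (· ++ [p.2])) PySem.Dict.empty).items.foldl pvObody cs = _
    rw [pvGroups_items, List.foldl_map]
  obtain ⟨hlen, hget⟩ := pvOuterFold cs (pvTlist cs) [] cs rfl rfl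
    (fun j => by rw [if_neg (by rintro ⟨-, hm⟩; exact List.not_mem_nil hm)])
  rw [hdef]
  apply List.ext_getElem (by rw [hlen, List.length_map])
  intro i h1 h2
  have hi : i < cs.length := by rwa [hlen] at h1
  have hmem : pvTy (cs.getD i PySem.Dict.empty) ∈ [] ++ pvTlist cs := by
    rw [List.nil_append, pvTlist, PySem.Set.mem_ofList, List.getD_eq_getElem _ _ hi]
    exact List.mem_map.2 ⟨cs[i], cs.getElem_mem hi, rfl⟩
  rw [← List.getD_eq_getElem _ PySem.Dict.empty h1, hget i, if_pos ⟨hi, hmem⟩,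
    List.getElem_map, List.getD_eq_getElem _ _ hi]

-- ---- combining ----

lemma pvInsert_self {d : PySem.Dict String String} {k : String}
    (hn : d.keys.Nodup) (hc : d.contains k = true) :
    d.insert k ((d.get? k).getD "") = d := by
  apply PySem.Dict.ext
  rw [PySem.Dict.items_insert_of_contains _ _ hc]
  have : ∀ p ∈ d.items, (if (p.1 == k) = true then (k, (d.get? k).getD "") else p) = p := by
    intro p hp
    by_cases hpk : p.1 = k
    · have : d.get? p.1 = some p.2 := PySem.Dict.get?_of_mem_items d (by simpa using hp) hn
      rw [if_pos (by simpa using hpk)]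
      rw [hpk] at this
      rw [this]
      simp [hpk.symm]
    · rw [if_neg (by simpa using hpk)]
  rw [List.map_congr_left this]
  simp

lemma pvUpd_eq (cs : List (PySem.Dict String String)) (e : PySem.Dict String String)
    (he : e ∈ cs) (hn : e.keys.Nodup) (hc : e.contains "container_type" = true) :
    pvUpdA cs e = pvUpdB cs e := by
  by_cases hle : (pvKs (pvTy e) cs).length ≤ 1
  · rw [pvUpdA, if_pos hle, pvUpdB]
    have hmem : pvNm e ∈ pvKs (pvTy e) cs := by
      rw [pvKs, PySem.Set.mem_ofList, pvNs]
      exact List.mem_map.2 ⟨e, List.mem_filter.2 ⟨he, by simp⟩, rfl⟩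
    have hK : pvKs (pvTy e) cs = [pvNm e] := by
      rcases hKs : pvKs (pvTy e) cs with _ | ⟨x, xs⟩
      · rw [hKs] at hmem; exact absurd hmem (List.not_mem_nil)
      · rw [hKs] at hle hmem
        have hxs : xs = [] := List.length_eq_zero_iff.1 (by simpa using hle)
        subst hxs
        simpa using (List.mem_singleton.1 hmem) ▸ rfl
    rw [hK]
    have : List.idxOf (pvNm e) [pvNm e] = 0 := List.idxOf_cons_self
    rw [this]
    have hval : pvVal (pvTy e) 0 = pvTy e := by simp [pvVal]
    rw [hval]
    exact (pvInsert_self hn hc).symm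
  · rw [pvUpdA, if_neg hle]

lemma pvProc_eq (cs : List (PySem.Dict String String))
    (h : ∀ e ∈ cs, e.keys.Nodup ∧ e.contains "container_type" = true) :
    pvProcA cs = pvProcB cs := by
  rw [pvProcA_eq, pvProcB_eq]
  exact List.map_congr_left (fun e he => pvUpd_eq cs e he (h e he).1 (h e he).2)

lemma pvCombined_ok (entities result_entities : List (List (String × String)))
    (hpre : Pre_update_container_types_optimized entities result_entities) :
    ∀ e ∈ (entities.map PySem.Dict.ofList
        ++ (if result_entities ≠ [] then [PySem.Dict.ofList (result_entities.getLast?.getD [])] else [])),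
      e.keys.Nodup ∧ e.contains "container_type" = true := by
  intro e he
  rcases List.mem_append.1 he with h | h
  · obtain ⟨x, hx, rfl⟩ := List.mem_map.1 h
    exact ⟨PySem.Dict.nodup_keys_ofList x, by
      have := (hpre.1 x hx)
      simp only [pvHasKeys, Bool.and_eq_true] at this
      exact this.1⟩
  · by_cases hrs : result_entities = []
    · rw [if_neg (by simp [hrs])] at h
      exact absurd h (List.not_mem_nil)
    · rw [if_pos hrs] at h
      have hl : result_entities.getLast? = some (result_entities.getLast hrs) :=
        List.getLast?_eq_some_getLast hrs
      rw [List.mem_singleton.1 h, hl]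
      refine ⟨PySem.Dict.nodup_keys_ofList _, ?_⟩
      have hmem : result_entities.getLast hrs ∈ result_entities.getLast?.toList := by rw [hl]; simp
      have := hpre.2 _ hmem
      simp only [pvHasKeys, Bool.and_eq_true] at this
      exact this.1

-- ===== VERDICT (by name: the statement is the Claim_ definition above) =====
theorem update_container_types_optimized_spec : Claim_equal_update_container_types_optimized := by
  intro entities result_entities _ hpre
  unfold Spec_update_container_types_optimized
  unfold update_container_types_optimized update_container_types_optimized_alt
  by_cases hrs : result_entities = []
  · subst hrs
    simp only [ne_eq, not_true_eq_false, if_false, List.append_nil]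
    rw [pvProc_eq _ (by
      have := pvCombined_ok entities [] hpre
      simpa using this)]
  · simp only [ne_eq, hrs, not_false_eq_true, if_true]
    rw [pvProc_eq _ (by
      have := pvCombined_ok entities result_entities hpre
      simp only [ne_eq, hrs, not_false_eq_true, if_true] at this
      exact this)]
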